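-- pv_equiv track=rewrite | github.com/FREEQUENCY1111/Darwin0.1 | src/darwin/utils/ani.py | compute_kmer_set
-- ===== SOURCE A (Python) =====
-- DEFAULT_K = 16
--
-- def compute_kmer_set(sequence: str, k: int = DEFAULT_K) -> set[str]:
--     """Extract all k-mers from a sequence, both strands."""
--     kmers: set[str] = set()
--     seq = sequence.upper()
--     rc_map = str.maketrans("ACGT", "TGCA")
--
--     for i in range(len(seq) - k + 1):
--         kmer = seq[i : i + k]
--         if "N" not in kmer:
--             # Canonical k-mer (min of forward and reverse complement)
--             rc = kmer.translate(rc_map)[::-1]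
--             kmers.add(min(kmer, rc))
--
--     return kmers
-- ===== SOURCE B (Python) =====
-- DEFAULT_K = 16
--
-- def compute_kmer_set(sequence: str, k: int = DEFAULT_K) -> set[str]:
--     """Extract all k-mers from a sequence, both strands.
--
--     Splits the uppercased sequence into N-separated segments first, so no
--     per-window 'N' membership test is needed; each segment's reverse
--     complement is computed once and each window's reverse complement is an
--     indexed slice of it.
--     """
--     kmers: set[str] = set()
--     rc_map = str.maketrans("ACGT", "TGCA")
--     for seg in sequence.upper().split("N"):
--         m = len(seg)
--         rc_seg = seg.translate(rc_map)[::-1]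
--         for j in range(m - k + 1):
--             fwd = seg[j : j + k]
--             rc = rc_seg[m - j - k : m - j]
--             kmers.add(min(fwd, rc))
--     return kmers
-- ===== Notes on version B (the rewrite author's own statement) =====
-- stated objective: alternative
-- what changed: B first splits the uppercased sequence into N-free segments (str.split('N')) and enumerates windows per segment, eliminating the per-window 'N' membership test, and takes each window's reverse complement as an indexed slice of the segment's reverse complement computed once per segment.
-- outside the precondition, e.g. on compute_kmer_set('ACGTAC', -2): A returns {'', 'ACGT', 'CGTA'}, B returns {''}
import Mathlib
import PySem

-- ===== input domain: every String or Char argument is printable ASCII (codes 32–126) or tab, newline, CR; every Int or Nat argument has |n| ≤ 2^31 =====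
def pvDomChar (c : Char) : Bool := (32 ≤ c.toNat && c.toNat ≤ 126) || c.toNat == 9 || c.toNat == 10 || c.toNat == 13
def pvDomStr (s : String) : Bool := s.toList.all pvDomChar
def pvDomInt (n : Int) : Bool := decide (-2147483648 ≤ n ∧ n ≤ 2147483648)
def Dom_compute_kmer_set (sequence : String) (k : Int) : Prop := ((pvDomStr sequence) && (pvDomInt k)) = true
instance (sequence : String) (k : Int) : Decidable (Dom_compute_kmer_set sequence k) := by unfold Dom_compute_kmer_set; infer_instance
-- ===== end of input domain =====

-- B splits the uppercased sequence into N-separated segments first — no per-window 'N' test —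
-- and takes each window's reverse complement as a slice of the segment's reverse complement,
-- computed once per segment (objective: alternative; same asymptotic cost).

-- str.maketrans("ACGT", "TGCA") applied per character; other characters unchanged
def rcChar (c : Char) : Char :=
  if c = 'A' then 'T' else if c = 'C' then 'G'
  else if c = 'G' then 'C' else if c = 'T' then 'A' else c

-- ===== PORT A =====
def compute_kmer_set (sequence : String) (k : Int) : List String :=
  let seq := PySem.Chars.upper sequence.toList
  let kmers : PySem.Set String :=
    (PySem.List.pyRange 0 ((seq.length : Int) - k + 1) 1).foldl (fun kmers i =>
      let kmer := PySem.List.slice seq (some i) (some (i + k))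
      if PySem.Chars.isIn ['N'] kmer then kmers
      else
        -- rc = kmer.translate(rc_map)[::-1]
        let rc := (kmer.map rcChar).reverse
        -- min of two strings: the second wins only when strictly smaller
        PySem.Set.add kmers (String.ofList (if rc < kmer then rc else kmer))) PySem.Set.empty
  kmers

-- ===== PORT B =====
def compute_kmer_set_alt (sequence : String) (k : Int) : List String :=
  let kmers : PySem.Set String :=
    -- for seg in sequence.upper().split("N"):
    (PySem.Chars.splitOn (PySem.Chars.upper sequence.toList) ['N']).foldl (fun kmers seg =>
      let m := seg.length
      -- rc_seg = seg.translate(rc_map)[::-1], once per segment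
      let rc_seg := (seg.map rcChar).reverse
      (PySem.List.pyRange 0 ((m : Int) - k + 1) 1).foldl (fun kmers j =>
        let fwd := PySem.List.slice seg (some j) (some (j + k))
        let rc := PySem.List.slice rc_seg (some ((m : Int) - j - k)) (some ((m : Int) - j))
        PySem.Set.add kmers (String.ofList (if rc < fwd then rc else fwd))) kmers) PySem.Set.empty
  kmers

-- ===== PRECONDITION & SPEC =====
-- Pre_ excludes negative k with |k| < len(sequence): there Python's negative slice stop
-- wraps around from the end of the string, so A returns accidental wraparound "k-mers"
-- that are an artefact of slicing (negative k is outside the function's natural domain;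
-- for |k| ≥ len(sequence) the wraparound has no effect and both ports are proved equal).
def Pre_compute_kmer_set (sequence : String) (k : Int) : Prop :=
  0 ≤ k ∨ (sequence.toList.length : Int) + k ≤ 0
instance (sequence : String) (k : Int) : Decidable (Pre_compute_kmer_set sequence k) := by unfold Pre_compute_kmer_set; infer_instance
def pvWitness_compute_kmer_set : String × Int := ("ACGTNacg", 3)

def Spec_compute_kmer_set (sequence : String) (k : Int) (out : List String) : Prop := out = compute_kmer_set_alt sequence k
instance (sequence : String) (k : Int) (out : List String) : Decidable (Spec_compute_kmer_set sequence k out) := by unfold Spec_compute_kmer_set; infer_instance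

-- ===== CLAIM (what is proved, stated in full; the proofs are below) =====
def Claim_equal_compute_kmer_set : Prop := ∀ (sequence : String) (k : Int), Dom_compute_kmer_set sequence k → Pre_compute_kmer_set sequence k → Spec_compute_kmer_set sequence k (compute_kmer_set sequence k)

-- ===== LEMMAS AND PROOFS =====

-- the canonical k-mer of a window, as both ports compute it
def canonK (w : List Char) : String :=
  String.ofList (if (w.map rcChar).reverse < w then (w.map rcChar).reverse else w)

-- all windows of length k of l, in order (seq[i:i+k] for i in range(len(seq)-k+1))
def winsN (l : List Char) (k : Nat) : List (List Char) :=
  (List.range (l.length + 1 - k)).map (fun i => (l.drop i).take k)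

-- structural form of l.split("N"), proved equal to PySem.Chars.splitOn l ['N'] below
def splitN : List Char → List (List Char)
  | [] => [[]]
  | c :: t =>
    match splitN t with
    | [] => [[]]      -- unreachable: splitN never returns []
    | h :: r => if c = 'N' then [] :: h :: r else (c :: h) :: r

theorem splitN_ne_nil (l : List Char) : splitN l ≠ [] := by
  cases l with
  | nil => simp [splitN]
  | cons c t =>
    simp only [splitN]
    cases splitN t with
    | nil => simp
    | cons h r => split_ifs <;> simp

theorem splitOn_go_eq :
    ∀ (fuel : Nat) (l cur : List Char) (acc : List (List Char)), l.length < fuel →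
      PySem.Chars.splitOn.go ['N'] fuel l cur acc
        = acc.reverse ++ (splitN l).modifyHead (cur.reverse ++ ·) := by
  intro fuel
  induction fuel with
  | zero => intro l cur acc h; omega
  | succ fuel ih =>
    intro l cur acc h
    cases l with
    | nil => simp [PySem.Chars.splitOn.go, splitN]
    | cons c t =>
      by_cases hc : c = 'N'
      · subst hc
        rw [show PySem.Chars.splitOn.go ['N'] (fuel+1) ('N'::t) cur acc
              = PySem.Chars.splitOn.go ['N'] fuel t [] (cur.reverse :: acc) from by
            simp [PySem.Chars.splitOn.go, List.isPrefixOf]]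
        rw [ih t [] _ (by simpa using h)]
        simp only [splitN]
        obtain ⟨h', r', hr⟩ : ∃ h' r', splitN t = h' :: r' := by
          cases hs : splitN t with
          | nil => exact absurd hs (splitN_ne_nil t)
          | cons a b => exact ⟨a, b, rfl⟩
        rw [hr]; simp
      · rw [show PySem.Chars.splitOn.go ['N'] (fuel+1) (c::t) cur acc
              = PySem.Chars.splitOn.go ['N'] fuel t (c :: cur) acc from by
            simp [PySem.Chars.splitOn.go, List.isPrefixOf, Ne.symm hc]]
        rw [ih t (c :: cur) _ (by simpa using h)]
        simp only [splitN]
        obtain ⟨h', r', hr⟩ : ∃ h' r', splitN t = h' :: r' := by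
          cases hs : splitN t with
          | nil => exact absurd hs (splitN_ne_nil t)
          | cons a b => exact ⟨a, b, rfl⟩
        rw [hr]
        simp [hc]

theorem splitOn_eq_splitN (l : List Char) :
    PySem.Chars.splitOn l ['N'] = splitN l := by
  rw [PySem.Chars.splitOn, splitOn_go_eq (l.length + 1) l [] [] (by omega)]
  obtain ⟨h', r', hr⟩ : ∃ h' r', splitN l = h' :: r' := by
    cases hs : splitN l with
    | nil => exact absurd hs (splitN_ne_nil l)
    | cons a b => exact ⟨a, b, rfl⟩
  rw [hr]; simp

theorem splitN_head (l : List Char) : ∀ (h : List Char) (r : List (List Char)), splitN l = h :: r →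
    'N' ∉ h ∧ (l = h ∨ ∃ u, l = h ++ 'N' :: u) := by
  induction l with
  | nil =>
    intro h r hs; simp [splitN] at hs
    obtain ⟨rfl, rfl⟩ := hs
    exact ⟨by simp, Or.inl rfl⟩
  | cons c t ih =>
    intro h r hs
    obtain ⟨h', r', hr⟩ : ∃ h' r', splitN t = h' :: r' := by
      cases hx : splitN t with
      | nil => exact absurd hx (splitN_ne_nil t)
      | cons a b => exact ⟨a, b, rfl⟩
    simp only [splitN, hr] at hs
    by_cases hc : c = 'N'
    · rw [if_pos hc] at hs
      obtain ⟨rfl, -⟩ := List.cons.inj hs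
      exact ⟨by simp, Or.inr ⟨t, by simp [hc]⟩⟩
    · rw [if_neg hc] at hs
      obtain ⟨rfl, rfl⟩ := List.cons.inj hs
      obtain ⟨hn, hstruct⟩ := ih h' r' hr
      refine ⟨by simp [hn, Ne.symm hc], ?_⟩
      rcases hstruct with rfl | ⟨u, rfl⟩
      · exact Or.inl rfl
      · exact Or.inr ⟨u, rfl⟩

theorem splitN_len (l : List Char) : ∀ seg ∈ splitN l, seg.length ≤ l.length := by
  induction l with
  | nil => intro seg hseg; simp [splitN] at hseg; simp [hseg]
  | cons c t ih =>
    intro seg hseg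
    obtain ⟨h', r', hr⟩ : ∃ h' r', splitN t = h' :: r' := by
      cases hx : splitN t with
      | nil => exact absurd hx (splitN_ne_nil t)
      | cons a b => exact ⟨a, b, rfl⟩
    simp only [splitN, hr] at hseg
    split_ifs at hseg with hc
    · rw [List.mem_cons] at hseg
      rcases hseg with rfl | hseg
      · simp
      · have := ih seg (by rw [hr]; exact hseg)
        simp only [List.length_cons]; omega
    · rw [List.mem_cons] at hseg
      rcases hseg with rfl | hseg
      · have := ih h' (by rw [hr]; exact List.mem_cons_self ..)
        simp only [List.length_cons]; omega
      · have := ih seg (by rw [hr]; exact List.mem_cons_of_mem _ hseg)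
        simp only [List.length_cons]; omega

theorem winsN_nil (k : Nat) (hk : 1 ≤ k) : winsN [] k = [] := by
  unfold winsN
  rw [show (List.length ([] : List Char) + 1 - k) = 0 by simp; omega]
  simp

theorem wins_cons (c : Char) (t : List Char) (k : Nat) (hk : 1 ≤ k) :
    winsN (c :: t) k
      = (if k ≤ t.length + 1 then [(c :: t).take k] else []) ++ winsN t k := by
  unfold winsN
  by_cases hle : k ≤ t.length + 1
  · rw [if_pos hle]
    have : (c :: t).length + 1 - k = (t.length + 1 - k) + 1 := by simp; omega
    rw [this, List.range_succ_eq_map, List.map_cons, List.map_map]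
    simp [Function.comp_def]
  · rw [if_neg hle]
    have h1 : (c :: t).length + 1 - k = 0 := by simp; omega
    have h2 : t.length + 1 - k = 0 := by omega
    rw [h1, h2]; simp

theorem noN_iff (w : List Char) : (!PySem.Chars.isIn ['N'] w) = true ↔ 'N' ∉ w := by
  rw [Bool.not_eq_eq_eq_not]
  simp only [Bool.not_true, PySem.Chars.isIn_eq_false_iff, List.singleton_infix_iff]

theorem filter_singleton_noN (w : List Char) :
    List.filter (fun w => !PySem.Chars.isIn ['N'] w) [w]
      = if 'N' ∈ w then [] else [w] := by
  by_cases h : 'N' ∈ w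
  · rw [if_pos h, List.filter_cons, if_neg (fun hc => (noN_iff w).mp hc h), List.filter_nil]
  · rw [if_neg h, List.filter_cons, if_pos ((noN_iff w).mpr h), List.filter_nil]

-- CORE: for k ≥ 1, the N-free windows of l are the windows of its N-split segments, in order
theorem filter_wins_eq (k : Nat) (hk : 1 ≤ k) : ∀ (l : List Char),
    (winsN l k).filter (fun w => !PySem.Chars.isIn ['N'] w)
      = (splitN l).flatMap (fun seg => winsN seg k) := by
  intro l
  induction l with
  | nil => simp [splitN, winsN_nil k hk]
  | cons c t ih =>
    obtain ⟨h, r, hr⟩ : ∃ h r, splitN t = h :: r := by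
      cases hx : splitN t with
      | nil => exact absurd hx (splitN_ne_nil t)
      | cons a b => exact ⟨a, b, rfl⟩
    obtain ⟨hNh, hstruct⟩ := splitN_head t h r hr
    rw [wins_cons c t k hk, List.filter_append]
    by_cases hc : c = 'N'
    · subst hc
      have hwin0 : List.filter (fun w => !PySem.Chars.isIn ['N'] w)
          (if k ≤ t.length + 1 then [('N' :: t).take k] else []) = [] := by
        split_ifs with hle
        · rw [filter_singleton_noN, if_pos]
          rw [List.take_cons (by omega : 0 < k)]
          exact List.mem_cons_self ..
        · simp
      have hs : splitN ('N' :: t) = [] :: h :: r := by simp [splitN, hr]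
      rw [hwin0, List.nil_append, ih, hs, hr, List.flatMap_cons (x := [])]
      rw [winsN_nil k hk, List.nil_append]
    · have hs : splitN (c :: t) = (c :: h) :: r := by simp [splitN, hr, hc]
      rw [hs, List.flatMap_cons, ih, hr, List.flatMap_cons, wins_cons c h k hk,
          ← List.append_assoc]
      congr 1
      congr 1
      rcases hstruct with rfl | ⟨u, rfl⟩
      · -- t = h, N-free
        split_ifs with hle
        · rw [filter_singleton_noN, if_neg]
          rw [List.take_cons (by omega : 0 < k)]
          simp only [List.mem_cons, not_or]
          exact ⟨fun hx => hc hx.symm, fun hx => hNh (List.mem_of_mem_take hx)⟩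
        · simp
      · -- t = h ++ 'N' :: u
        have hlen : (h ++ 'N' :: u).length = h.length + 1 + u.length := by
          simp only [List.length_append, List.length_cons]; omega
        by_cases hkh : k ≤ h.length + 1
        · have hle : k ≤ (h ++ 'N' :: u).length + 1 := by omega
          rw [if_pos hle, if_pos hkh, filter_singleton_noN,
              List.take_cons (by omega : 0 < k),
              List.take_append_of_le_length (by omega : k - 1 ≤ h.length)]
          rw [if_neg]
          · rw [List.take_cons (by omega : 0 < k)]
          · simp only [List.mem_cons, not_or]
            exact ⟨fun hx => hc hx.symm, fun hx => hNh (List.mem_of_mem_take hx)⟩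
        · rw [if_neg hkh]
          split_ifs with hle
          · rw [filter_singleton_noN, if_pos]
            rw [List.take_cons (by omega : 0 < k)]
            refine List.mem_cons_of_mem _ ?_
            have : k - 1 = h.length + (k - 1 - h.length) := by omega
            rw [this, List.take_append]
            refine List.mem_append_right _ ?_
            rw [show h.length + (k - 1 - h.length) - h.length = k - 1 - h.length by omega,
                List.take_cons (by omega : 0 < k - 1 - h.length)]
            exact List.mem_cons_self ..
          · simp

-- A's loop over range, with any body applied to the window slice, is a fold over winsN
theorem fold_range_to_wins (l : List Char) (k' : Nat)
    (g : PySem.Set String → List Char → PySem.Set String) (init : PySem.Set String) :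
    (PySem.List.pyRange 0 ((l.length : Int) - (k' : Int) + 1) 1).foldl
        (fun a i => g a (PySem.List.slice l (some i) (some (i + (k' : Int))))) init
      = (winsN l k').foldl g init := by
  rw [PySem.List.pyRange_one]
  rw [show ((l.length : Int) - (k' : Int) + 1 - 0).toNat = l.length + 1 - k' by omega]
  rw [List.foldl_map]
  unfold winsN
  rw [List.foldl_map]
  apply PySem.List.foldl_congr_mem
  intro acc j hj
  rw [List.mem_range] at hj
  rw [zero_add, PySem.List.slice_natCast_add]

theorem portA_norm (s : String) (k' : Nat) :
    compute_kmer_set s (k' : Int)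
      = PySem.Set.ofList
          (((winsN (PySem.Chars.upper s.toList) k').filter
              (fun w => !PySem.Chars.isIn ['N'] w)).map canonK) := by
  unfold compute_kmer_set
  simp only
  rw [fold_range_to_wins (PySem.Chars.upper s.toList) k'
      (fun a w => if PySem.Chars.isIn ['N'] w then a
        else PySem.Set.add a (String.ofList (if (w.map rcChar).reverse < w then (w.map rcChar).reverse else w)))
      PySem.Set.empty]
  have h1 := PySem.List.foldl_congr_mem
      (l := winsN (PySem.Chars.upper s.toList) k') (init := PySem.Set.empty)
      (f := fun a w => if PySem.Chars.isIn ['N'] w = true then a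
        else PySem.Set.add a (String.ofList (if (w.map rcChar).reverse < w then (w.map rcChar).reverse else w)))
      (g := fun a w => if (!PySem.Chars.isIn ['N'] w) = true then PySem.Set.add a (canonK w) else a)
      (by intro acc w _; cases h : PySem.Chars.isIn ['N'] w <;> simp [h, canonK])
  rw [h1, PySem.List.foldl_if_eq_foldl_filter, PySem.Set.ofList_eq_foldl,
      List.foldl_map]
  rfl

theorem reverse_window (l : List Char) (I K : Nat) (h : I + K ≤ l.length) :
    ((l.drop I).take K).reverse = (l.reverse.drop (l.length - I - K)).take K := by
  rw [List.drop_reverse]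
  have h1 : l.length - (l.length - I - K) = I + K := by omega
  rw [h1, List.take_reverse, List.length_take]
  have h2 : min (I + K) l.length - K = I := by omega
  rw [h2, List.drop_take]
  have h3 : I + K - I = K := by omega
  rw [h3]

-- B's rc slice equals A's translated-and-reversed window
theorem step_eq (seq : List Char) (k i : Int) (hk : 0 ≤ k) (hi : 0 ≤ i)
    (hub : i < (seq.length : Int) - k + 1) :
    PySem.List.slice ((seq.map rcChar).reverse)
        (some ((seq.length : Int) - i - k)) (some ((seq.length : Int) - i))
      = ((PySem.List.slice seq (some i) (some (i + k))).map rcChar).reverse := by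
  have hik : i + k ≤ (seq.length : Int) := by omega
  rw [PySem.List.slice_toNat _ (by omega) (by omega),
      PySem.List.slice_toNat _ hi (by omega)]
  have hI : i.toNat + k.toNat ≤ seq.length := by omega
  have h1 : ((seq.length : Int) - i - k).toNat = seq.length - i.toNat - k.toNat := by omega
  rw [h1]
  have h2 : ((seq.length : Int) - i).toNat - (seq.length - i.toNat - k.toNat) = k.toNat := by omega
  have h3 : (i + k).toNat - i.toNat = k.toNat := by omega
  rw [h2, h3, List.map_take, List.map_drop]
  have := reverse_window (seq.map rcChar) i.toNat k.toNat (by simpa using hI)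
  rw [List.length_map] at this
  exact this.symm

theorem portB_norm (s : String) (k' : Nat) :
    compute_kmer_set_alt s (k' : Int)
      = PySem.Set.ofList
          ((splitN (PySem.Chars.upper s.toList)).flatMap
            (fun seg => (winsN seg k').map canonK)) := by
  unfold compute_kmer_set_alt
  simp only
  rw [splitOn_eq_splitN, PySem.Set.ofList_eq_foldl, List.foldl_flatMap]
  apply PySem.List.foldl_congr_mem
  intro acc seg _
  have h1 := PySem.List.foldl_congr_mem
      (l := PySem.List.pyRange 0 ((seg.length : Int) - (k' : Int) + 1) 1) (init := acc)
      (f := fun a j =>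
        PySem.Set.add a (String.ofList
          (if PySem.List.slice ((seg.map rcChar).reverse)
                (some ((seg.length : Int) - j - (k' : Int))) (some ((seg.length : Int) - j))
              < PySem.List.slice seg (some j) (some (j + (k' : Int)))
           then PySem.List.slice ((seg.map rcChar).reverse)
                (some ((seg.length : Int) - j - (k' : Int))) (some ((seg.length : Int) - j))
           else PySem.List.slice seg (some j) (some (j + (k' : Int))))))
      (g := fun a j => PySem.Set.add a (canonK (PySem.List.slice seg (some j) (some (j + (k' : Int))))))
      (by
        intro a j hj
        rw [PySem.List.mem_pyRange_one] at hj
        beta_reduce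
        rw [step_eq seg (k' : Int) j (by positivity) hj.1 hj.2]
        rfl)
  rw [h1]
  rw [fold_range_to_wins seg k' (fun a w => PySem.Set.add a (canonK w)) acc]
  rw [List.foldl_map]

-- degenerate windows (k = 0, or k < 0 with no room) are the empty slice
theorem slice_empty_deg (l : List Char) (i k : Int) (hk : k ≤ 0)
    (hdeg : k = 0 ∨ (l.length : Int) + k ≤ 0) (hi : 0 ≤ i) :
    PySem.List.slice l (some i) (some (i + k)) = [] := by
  apply List.eq_nil_of_length_eq_zero
  rw [PySem.List.length_slice]
  simp only [PySem.List.clampIdx]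
  rcases hdeg with h | h <;> split_ifs <;> omega

theorem add_add_self (s : PySem.Set String) (x : String) :
    PySem.Set.add (PySem.Set.add s x) x = PySem.Set.add s x := by
  simp only [PySem.Set.add, PySem.Set.contains]
  split_ifs with h1 h2 h2 <;> first
    | rfl
    | exact absurd (by simp : List.contains (s ++ [x]) x = true) h2

theorem foldl_const_add {α : Type} (x : String) :
    ∀ (L : List α) (acc : PySem.Set String), L ≠ [] →
      L.foldl (fun a _ => PySem.Set.add a x) acc = PySem.Set.add acc x := by
  intro L
  induction L with
  | nil => intro acc h; exact absurd rfl h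
  | cons y t ih =>
    intro acc _
    cases t with
    | nil => rfl
    | cons z u =>
      rw [List.foldl_cons, ih (PySem.Set.add acc x) (by simp), add_add_self]

-- in the degenerate cases both ports return {""}
theorem portA_deg (s : String) (k : Int) (hk : k ≤ 0)
    (hdeg : k = 0 ∨ (s.toList.length : Int) + k ≤ 0) :
    compute_kmer_set s k = [""] := by
  unfold compute_kmer_set
  simp only
  have hlen : ((PySem.Chars.upper s.toList).length : Int) = (s.toList.length : Int) := by
    simp [PySem.Chars.upper]
  have h1 := PySem.List.foldl_congr_mem
      (l := PySem.List.pyRange 0 (((PySem.Chars.upper s.toList).length : Int) - k + 1) 1)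
      (init := PySem.Set.empty)
      (f := fun kmers i =>
        if PySem.Chars.isIn ['N'] (PySem.List.slice (PySem.Chars.upper s.toList) (some i) (some (i + k))) then kmers
        else PySem.Set.add kmers (String.ofList
          (if ((PySem.List.slice (PySem.Chars.upper s.toList) (some i) (some (i + k))).map rcChar).reverse
              < PySem.List.slice (PySem.Chars.upper s.toList) (some i) (some (i + k))
           then ((PySem.List.slice (PySem.Chars.upper s.toList) (some i) (some (i + k))).map rcChar).reverse
           else PySem.List.slice (PySem.Chars.upper s.toList) (some i) (some (i + k)))))
      (g := fun kmers _ => PySem.Set.add kmers "")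
      (by
        intro a i hi
        rw [PySem.List.mem_pyRange_one] at hi
        beta_reduce
        rw [slice_empty_deg (PySem.Chars.upper s.toList) i k hk
            (by rw [hlen]; exact hdeg) hi.1]
        rw [show PySem.Chars.isIn ['N'] ([] : List Char) = false from rfl]
        simp only [Bool.false_eq_true, if_false, List.map_nil, List.reverse_nil]
        rw [if_neg (List.not_lt_nil ([] : List Char))])
  rw [h1, foldl_const_add]
  · rfl
  · have : (0:Int) < ((PySem.Chars.upper s.toList).length : Int) - k + 1 := by
      have : (0:Int) ≤ ((PySem.Chars.upper s.toList).length : Int) := by positivity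
      omega
    intro hcontra
    have := congrArg List.length hcontra
    rw [PySem.List.length_pyRange_one] at this
    simp at this
    omega

theorem portB_deg (s : String) (k : Int) (hk : k ≤ 0)
    (hdeg : k = 0 ∨ (s.toList.length : Int) + k ≤ 0) :
    compute_kmer_set_alt s k = [""] := by
  unfold compute_kmer_set_alt
  simp only
  rw [splitOn_eq_splitN]
  have hlen : (PySem.Chars.upper s.toList).length = s.toList.length := by
    simp [PySem.Chars.upper]
  have houter := PySem.List.foldl_congr_mem
      (l := splitN (PySem.Chars.upper s.toList)) (init := PySem.Set.empty)
      (f := fun kmers seg =>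
        (PySem.List.pyRange 0 ((seg.length : Int) - k + 1) 1).foldl (fun kmers j =>
          PySem.Set.add kmers (String.ofList
            (if PySem.List.slice ((seg.map rcChar).reverse)
                  (some ((seg.length : Int) - j - k)) (some ((seg.length : Int) - j))
                < PySem.List.slice seg (some j) (some (j + k))
             then PySem.List.slice ((seg.map rcChar).reverse)
                  (some ((seg.length : Int) - j - k)) (some ((seg.length : Int) - j))
             else PySem.List.slice seg (some j) (some (j + k))))) kmers)
      (g := fun kmers _ => PySem.Set.add kmers "")
      (by
        intro acc seg hseg
        beta_reduce
        have hsegdeg : k = 0 ∨ (seg.length : Int) + k ≤ 0 := by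
          rcases hdeg with h | h
          · exact Or.inl h
          · refine Or.inr ?_
            have := splitN_len (PySem.Chars.upper s.toList) seg hseg
            rw [hlen] at this
            omega
        have hinner := PySem.List.foldl_congr_mem
            (l := PySem.List.pyRange 0 ((seg.length : Int) - k + 1) 1) (init := acc)
            (f := fun a j =>
              PySem.Set.add a (String.ofList
                (if PySem.List.slice ((seg.map rcChar).reverse)
                      (some ((seg.length : Int) - j - k)) (some ((seg.length : Int) - j))
                    < PySem.List.slice seg (some j) (some (j + k))
                 then PySem.List.slice ((seg.map rcChar).reverse)
                      (some ((seg.length : Int) - j - k)) (some ((seg.length : Int) - j))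
                 else PySem.List.slice seg (some j) (some (j + k)))))
            (g := fun a _ => PySem.Set.add a "")
            (by
              intro a j hj
              rw [PySem.List.mem_pyRange_one] at hj
              beta_reduce
              rw [slice_empty_deg seg j k hk hsegdeg hj.1]
              rw [if_neg (List.not_lt_nil _)])
        rw [hinner, foldl_const_add]
        intro hcontra
        have := congrArg List.length hcontra
        rw [PySem.List.length_pyRange_one] at this
        simp only [List.length_nil] at this
        omega)
  rw [houter, foldl_const_add]
  · rfl
  · exact splitN_ne_nil _

theorem AB_eq (s : String) (k : Int)
    (hpre : 0 ≤ k ∨ (s.toList.length : Int) + k ≤ 0) :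
    compute_kmer_set s k = compute_kmer_set_alt s k := by
  by_cases hk1 : 1 ≤ k
  · obtain ⟨k', rfl⟩ : ∃ k' : Nat, k = (k' : Int) :=
      ⟨k.toNat, (Int.toNat_of_nonneg (by omega)).symm⟩
    rw [portA_norm, portB_norm, filter_wins_eq k' (by exact_mod_cast hk1), List.map_flatMap]
  · have hk0 : k ≤ 0 := by omega
    have hdeg : k = 0 ∨ (s.toList.length : Int) + k ≤ 0 := by
      rcases hpre with h | h
      · exact Or.inl (by omega)
      · exact Or.inr h
    rw [portA_deg s k hk0 hdeg, portB_deg s k hk0 hdeg]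

-- ===== VERDICT =====
theorem compute_kmer_set_spec : Claim_equal_compute_kmer_set := by
  intro sequence k _ hpre
  exact AB_eq sequence k hpre
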